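-- pv_equiv track=rewrite | github.com/Maplemx/Agently | agently/utils/DataPathBuilder.py | convert_dot_to_slash
-- ===== SOURCE A (Python) =====
-- def convert_dot_to_slash(dot_path: str) -> str:
--     """
--     Convert dot-style path to slash-style path.
--     Example: 'user.name' -> '/user/name', 'tasks[*].id' -> '/tasks/[*]/id'
--     """
--     if not dot_path:
--         return "/"
--
--     parts = []
--     buffer = ""
--     i = 0
--     while i < len(dot_path):
--         if dot_path[i] == "[":
--             if buffer:
--                 parts.append(buffer)
--                 buffer = ""
--             end = dot_path.find("]", i)
--             parts.append(dot_path[i : end + 1])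
--             i = end + 1
--         elif dot_path[i] == ".":
--             if buffer:
--                 parts.append(buffer)
--                 buffer = ""
--             i += 1
--         else:
--             buffer += dot_path[i]
--             i += 1
--     if buffer:
--         parts.append(buffer)
--
--     return "/" + "/".join(parts)
-- ===== SOURCE B (Python) =====
-- import re
--
-- # Tokenize in one regex pass: bracket groups "[...]" (up to the first ']'),
-- # or maximal runs of characters that are neither '.' nor '['.
-- _TOKEN = re.compile(r'\[[^\]]*\]|[^.\[]+')
--
-- def convert_dot_to_slash(dot_path: str) -> str:
--     return "/" + "/".join(_TOKEN.findall(dot_path))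
-- ===== Notes on version B (the rewrite author's own statement) =====
-- stated objective: faster
-- what changed: Replaces the manual index/buffer/parts while-loop (with per-character string concatenation and str.find for brackets) by a single regex findall that tokenizes bracket groups and non-dot runs in one pass, joined with '/'.
-- outside the precondition, e.g. on convert_dot_to_slash('['): A does not finish within the time limit, B returns '/'
import Mathlib
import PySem

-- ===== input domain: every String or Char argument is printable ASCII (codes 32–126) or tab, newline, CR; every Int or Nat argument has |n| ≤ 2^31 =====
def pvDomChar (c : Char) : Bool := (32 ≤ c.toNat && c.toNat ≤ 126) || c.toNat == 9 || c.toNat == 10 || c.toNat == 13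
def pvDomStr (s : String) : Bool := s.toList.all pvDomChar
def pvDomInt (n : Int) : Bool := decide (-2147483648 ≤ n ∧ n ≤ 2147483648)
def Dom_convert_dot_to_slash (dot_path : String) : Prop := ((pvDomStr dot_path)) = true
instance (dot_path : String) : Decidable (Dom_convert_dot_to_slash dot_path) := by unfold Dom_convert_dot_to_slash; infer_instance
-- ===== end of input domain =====

-- B replaces A's manual index/buffer while-loop by a one-pass regex tokenization
-- (bracket groups or runs of non-dot/non-bracket chars) joined with '/'.


-- ===== PORT A =====
-- The while-loop, with fuel only as a totality guard: under Pre_ the index strictly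
-- increases each iteration, so `s.length + 1` fuel is never exhausted.
def loopA (s : List Char) (fuel : Nat) (i : Int) (buffer : List Char)
    (parts : List (List Char)) : List (List Char) :=
  match fuel with
  | 0 => parts ++ (if buffer = [] then [] else [buffer])
  | fuel + 1 =>
    if i < (s.length : Int) then
      match PySem.List.pyGet? s i with
      | none => parts ++ (if buffer = [] then [] else [buffer]) -- unreachable: 0 ≤ i < len
      | some c =>
        if c = '[' then
          let parts1 := if buffer = [] then parts else parts ++ [buffer]
          let e := PySem.Chars.findFrom s [']'] i            -- dot_path.find("]", i)
          loopA s fuel (e + 1) []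
            (parts1 ++ [PySem.List.slice s (some i) (some (e + 1))])  -- dot_path[i:end+1]
        else if c = '.' then
          loopA s fuel (i + 1) [] (if buffer = [] then parts else parts ++ [buffer])
        else
          loopA s fuel (i + 1) (buffer ++ [c]) parts
    else parts ++ (if buffer = [] then [] else [buffer])

def convert_dot_to_slash (dot_path : String) : String :=
  let s := dot_path.toList
  if s = [] then "/"
  else String.mk ('/' :: PySem.Chars.join ['/'] (loopA s (s.length + 1) 0 [] []))

-- ===== PORT B =====
def pvWordChar (c : Char) : Bool := !(c == '.' || c == '[')

-- Hand port of re.findall(r'\[[^\]]*\]|[^.\[]+', s): at each position the first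
-- alternative matches a '[' through the first following ']' (it fails when no ']'
-- follows, and the unmatched '[' is skipped); the second matches a maximal run of
-- characters that are neither '.' nor '['. Exact for this pattern on all inputs.
def tokensB (cs : List Char) : List (List Char) :=
  match cs with
  | [] => []
  | c :: rest =>
    if c = '[' then
      let rest' := rest.dropWhile (· != ']')
      if rest' = [] then tokensB rest
      else ('[' :: rest.takeWhile (· != ']') ++ [']']) :: tokensB rest'.tail
    else if c = '.' then tokensB rest
    else (c :: rest.takeWhile pvWordChar) :: tokensB (rest.dropWhile pvWordChar)
termination_by cs.length
decreasing_by
  all_goals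
    have hd := List.length_dropWhile_le (· != ']') rest
    have hw := List.length_dropWhile_le pvWordChar rest
    simp only [List.length_cons, List.length_tail]
    omega

def convert_dot_to_slash_alt (dot_path : String) : String :=
  String.mk ('/' :: PySem.Chars.join ['/'] (tokensB dot_path.toList))

-- ===== PRECONDITION & SPEC =====
def BClosed (s : List Char) : Prop :=
  ∀ i : Fin s.length, s.get i = '[' → ∃ j : Fin s.length, i.val ≤ j.val ∧ s.get j = ']'

-- A's while-loop never terminates on inputs where some '[' has no ']' at or after it
-- (str.find returns -1, so i resets to 0); exactly those inputs are excluded.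
def Pre_convert_dot_to_slash (dot_path : String) : Prop := BClosed dot_path.toList
instance (dot_path : String) : Decidable (Pre_convert_dot_to_slash dot_path) := by
  unfold Pre_convert_dot_to_slash BClosed; infer_instance

def pvWitness_convert_dot_to_slash : String := "tasks[*].id"

def Spec_convert_dot_to_slash (dot_path : String) (out : String) : Prop := out = convert_dot_to_slash_alt dot_path
instance (dot_path : String) (out : String) : Decidable (Spec_convert_dot_to_slash dot_path out) := by unfold Spec_convert_dot_to_slash; infer_instance

-- ===== CLAIM (what is proved, stated in full; the proofs are below) =====
def Claim_equal_convert_dot_to_slash : Prop := ∀ (dot_path : String), Dom_convert_dot_to_slash dot_path → Pre_convert_dot_to_slash dot_path → Spec_convert_dot_to_slash dot_path (convert_dot_to_slash dot_path)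

-- ===== LEMMAS AND PROOFS =====

-- The loop invariant value: result of A's loop from suffix `cs` with pending buffer `b`.
def G (cs b : List Char) : List (List Char) :=
  if b = [] then tokensB cs
  else (b ++ cs.takeWhile pvWordChar) :: tokensB (cs.dropWhile pvWordChar)

lemma takeWhile_middle {α} (p : α → Bool) (u : List α) (a : α) (v : List α)
    (hu : ∀ x ∈ u, p x = true) (ha : p a = false) :
    (u ++ a :: v).takeWhile p = u ∧ (u ++ a :: v).dropWhile p = a :: v := by
  induction u with
  | nil => simp [List.takeWhile, List.dropWhile, ha]
  | cons x t ih =>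
    have hx : p x = true := hu x (by simp)
    have := ih (fun y hy => hu y (by simp [hy]))
    simp [List.takeWhile, List.dropWhile, hx, this.1, this.2]

lemma G_nil (b : List Char) : G [] b = if b = [] then [] else [b] := by
  by_cases hb : b = [] <;> simp [G, hb, tokensB]

lemma G_word (c : Char) (rest b : List Char) (h1 : c ≠ '[') (h2 : c ≠ '.') :
    G (c :: rest) b = G rest (b ++ [c]) := by
  have hw : pvWordChar c = true := by simp [pvWordChar, h1, h2]
  by_cases hb : b = []
  · simp [G, hb, tokensB, h1, h2, hw, List.takeWhile_cons, List.dropWhile_cons]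
  · simp [G, hb, hw, List.takeWhile_cons, List.dropWhile_cons]

lemma G_dot (rest b : List Char) :
    G ('.' :: rest) b = (if b = [] then [] else [b]) ++ G rest [] := by
  by_cases hb : b = []
  · simp [G, hb, tokensB]
  · simp [G, hb, tokensB, pvWordChar, List.takeWhile_cons, List.dropWhile_cons]

lemma G_bracket (rest b v : List Char)
    (hd : rest.dropWhile (· != ']') = ']' :: v) :
    G ('[' :: rest) b =
      (if b = [] then [] else [b]) ++
        (('[' :: rest.takeWhile (· != ']') ++ [']']) :: tokensB v) := by
  have ht : tokensB ('[' :: rest) =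
      ('[' :: rest.takeWhile (· != ']') ++ [']']) :: tokensB v := by
    rw [tokensB]
    simp [hd]
  by_cases hb : b = []
  · simp [G, hb, ht]
  · simp [G, hb, ht, pvWordChar, List.takeWhile_cons, List.dropWhile_cons]

lemma loopA_invariant (s : List Char) (hP : BClosed s) :
    ∀ (fuel k : Nat) (b : List Char) (parts : List (List Char)),
      s.length - k ≤ fuel →
      loopA s fuel (k : Int) b parts = parts ++ G (s.drop k) b := by
  intro fuel
  induction fuel with
  | zero =>
    intro k b parts hf
    have hk : s.length ≤ k := by omega
    rw [List.drop_eq_nil_of_le hk, G_nil]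
    simp [loopA]
  | succ fuel ih =>
    intro k b parts hf
    by_cases hk : k < s.length
    · have hlt : (k : Int) < (s.length : Int) := by exact_mod_cast hk
      have hget : PySem.List.pyGet? s (k : Int) = some s[k] := by
        rw [PySem.List.pyGet?_natCast]; simp [hk]
      have hdropk : s.drop k = s[k] :: s.drop (k + 1) := List.drop_eq_getElem_cons hk
      rw [loopA]
      rw [if_pos hlt]
      simp only [hget]
      by_cases hc1 : s[k] = '['
      · -- bracket branch
        rw [if_pos hc1]
        -- the ']' exists at or after k
        obtain ⟨j, hkj, hj⟩ := hP ⟨k, hk⟩ (by simpa using hc1)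
        have hkj' : k ≤ j.val := hkj
        have hjlt := j.isLt
        have hjv : s[j.val] = ']' := hj
        have hmem : (']' : Char) ∈ s.drop k := by
          rw [List.mem_iff_getElem]
          refine ⟨j.val - k, by simp [List.length_drop]; omega, ?_⟩
          rw [List.getElem_drop]
          have heq : k + (j.val - k) = j.val := by omega
          simp only [heq, hjv]
        have hinfix : [']'] <:+: s.drop k := by
          obtain ⟨u, v, huv⟩ := List.mem_iff_append.mp hmem
          exact ⟨u, v, by simp [huv]⟩
        have hne : PySem.Chars.findFrom s [']'] (k : Nat) ≠ -1 := by
          intro hcon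
          exact (PySem.Chars.findFrom_natCast_eq_neg_one_iff s [']'] k
            (le_of_lt hk)).mp hcon (by simpa using hinfix)
        obtain ⟨hke, hpre, hmin⟩ :=
          PySem.Chars.findFrom_natCast_spec s [']'] k (le_of_lt hk) hne
        set e := PySem.Chars.findFrom s [']'] (k : Nat) with he
        have h0e : 0 ≤ e := le_trans (by exact_mod_cast Nat.zero_le k) hke
        set m := e.toNat with hm
        have hem : e = (m : Int) := (Int.toNat_of_nonneg h0e).symm
        obtain ⟨t, ht⟩ := hpre
        have ht' : s.drop m = ']' :: t := by simpa using ht.symm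
        have hmlen : m < s.length := by
          by_contra hml
          have hnil : s.drop m = [] := List.drop_eq_nil_of_le (by omega)
          rw [hnil] at ht'
          simp at ht'
        have hsm : s[m] = ']' := by
          have := List.drop_eq_getElem_cons hmlen
          rw [this] at ht'
          exact (List.cons.injEq _ _ _ _ ▸ ht').1
        have hkm : k ≤ m := by
          have : (k : Int) ≤ (m : Int) := hem ▸ hke
          exact_mod_cast this
        have hkm' : k < m := by
          rcases Nat.lt_or_ge k m with h | h
          · exact h
          · exfalso
            have hkm2 : k = m := by omega
            have h1 : s[k] = ']' := by simpa [hkm2] using hsm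
            rw [hc1] at h1
            simp at h1
        clear_value m e
        -- decompose the tail after '[' around the first ']'
        set u := (s.drop (k + 1)).take (m - (k + 1)) with hu
        have hulen : u.length = m - (k + 1) := by
          rw [hu, List.length_take, List.length_drop]
          omega
        have hdec : s.drop (k + 1) = u ++ ']' :: s.drop (m + 1) := by
          have h1 : s.drop (k + 1) = u ++ (s.drop (k + 1)).drop (m - (k + 1)) :=
            (List.take_append_drop _ _).symm
          have h2 : (s.drop (k + 1)).drop (m - (k + 1)) = s.drop m := by
            rw [List.drop_drop]; congr 1; omega
          have h3 : s.drop m = ']' :: s.drop (m + 1) := by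
            rw [List.drop_eq_getElem_cons hmlen, hsm]
          rw [h1, h2, h3]
        have huprop : ∀ x ∈ u, (x != ']') = true := by
          intro x hx
          rw [List.mem_iff_getElem] at hx
          obtain ⟨idx, hidx, hxval⟩ := hx
          have hidx' : idx < m - (k + 1) := by omega
          have hxeq : x = s[k + 1 + idx]'(by omega) := by
            rw [← hxval]; simp [hu, List.getElem_take, List.getElem_drop]
          have hnotpre : ¬ [']'] <+: s.drop (k + 1 + idx) :=
            hmin (k + 1 + idx) (by omega) (by omega)
          have : s[k + 1 + idx]'(by omega) ≠ ']' := by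
            intro hcon
            apply hnotpre
            have := List.drop_eq_getElem_cons (l := s) (i := k + 1 + idx) (by omega)
            rw [this, hcon]
            exact ⟨_, rfl⟩
          simp [hxeq, this]
        have hsplit := takeWhile_middle (· != ']') u ']' (s.drop (m + 1)) huprop (by simp)
        have htake : (s.drop (k + 1)).takeWhile (· != ']') = u := by rw [hdec]; exact hsplit.1
        have hdrop : (s.drop (k + 1)).dropWhile (· != ']') = ']' :: s.drop (m + 1) := by
          rw [hdec]; exact hsplit.2
        -- the slice s[i:end+1]
        have hslice : PySem.List.slice s (some ((k : Nat) : Int)) (some ((m + 1 : Nat) : Int)) =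
            '[' :: u ++ [']'] := by
          rw [PySem.List.slice_natCast]
          have h1 : (s.drop k).take (m + 1 - k) = '[' :: (s.drop (k + 1)).take (m - k) := by
            rw [hdropk, hc1]
            have : m + 1 - k = (m - k) + 1 := by omega
            rw [this, List.take_succ_cons]
          have h2 : (s.drop (k + 1)).take (m - k) = u ++ [']'] := by
            rw [hdec, List.take_append]
            have e1 : u.length ≤ m - k := by omega
            rw [List.take_of_length_le e1]
            have e2 : m - k - u.length = 1 := by omega
            rw [e2]
            simp [List.take_succ_cons]
          rw [h1, h2]
          simp
        -- apply IH at k' = m + 1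
        have hstep : e + 1 = ((m + 1 : Nat) : Int) := by rw [hem]; push_cast; ring
        rw [hstep]
        rw [hslice]
        rw [ih (m + 1) [] _ (by omega)]
        rw [hdropk, hc1, G_bracket _ _ _ hdrop, htake]
        by_cases hb : b = [] <;> simp [hb, G]
      · rw [if_neg hc1]
        by_cases hc2 : s[k] = '.'
        · rw [if_pos hc2]
          have : (k : Int) + 1 = ((k + 1 : Nat) : Int) := by push_cast; ring
          rw [this, ih (k + 1) [] _ (by omega)]
          rw [hdropk, hc2, G_dot]
          by_cases hb : b = [] <;> simp [hb, G]
        · rw [if_neg hc2]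
          have : (k : Int) + 1 = ((k + 1 : Nat) : Int) := by push_cast; ring
          rw [this, ih (k + 1) (b ++ [s[k]]) _ (by omega)]
          rw [hdropk, G_word s[k] _ b hc1 hc2]
    · have hlt : ¬ (k : Int) < (s.length : Int) := by exact_mod_cast hk
      rw [loopA, if_neg hlt, List.drop_eq_nil_of_le (by omega), G_nil]

-- ===== VERDICT (by name: the statement is the Claim_ definition above) =====
theorem convert_dot_to_slash_spec : Claim_equal_convert_dot_to_slash := by
  intro dot_path _ hpre
  unfold Spec_convert_dot_to_slash convert_dot_to_slash convert_dot_to_slash_alt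
  by_cases h : dot_path.toList = []
  · simp only [h, if_true]
    have ht : tokensB [] = [] := by rw [tokensB]
    rw [ht]
    rfl
  · rw [if_neg h]
    have h0 : (0 : Int) = ((0 : Nat) : Int) := rfl
    rw [h0, loopA_invariant dot_path.toList hpre (dot_path.toList.length + 1) 0 [] []
      (by omega)]
    simp [G]
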